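-- pv_equiv track=rewrite | github.com/shinyo-xinyi/FAB_Rate | Server/sentimentAnalyzer.py | negated
-- ===== SOURCE A (Python) =====
-- NEGATE = \
--     ["aint", "arent", "cannot", "cant", "couldnt", "darent", "didnt", "doesnt",
--      "ain't", "aren't", "can't", "couldn't", "daren't", "didn't", "doesn't",
--      "dont", "hadnt", "hasnt", "havent", "isnt", "mightnt", "mustnt", "neither",
--      "don't", "hadn't", "hasn't", "haven't", "isn't", "mightn't", "mustn't",
--      "neednt", "needn't", "never", "none", "nope", "nor", "not", "nothing", "nowhere",
--      "oughtnt", "shant", "shouldnt", "uhuh", "wasnt", "werent",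
--      "oughtn't", "shan't", "shouldn't", "uh-uh", "wasn't", "weren't",
--      "without", "wont", "wouldnt", "won't", "wouldn't", "rarely", "seldom", "despite",
--      "only", "least"
--      ]
--
-- def negated(input_words, include_nt=True):
--     """
--     Determine if input contains negation words
--     """
--     input_words = [str(w).lower() for w in input_words]
--     neg_words = []
--     neg_words.extend(NEGATE)
--     for word in neg_words:
--         if word in input_words:
--             return True
--     if include_nt:
--         for word in input_words:
--             if "n't" in word:
--                 return True
--     return False
-- ===== SOURCE B (Python) =====
-- NEGATE_SET = frozenset(
--     ("aint arent cannot cant couldnt darent didnt doesnt "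
--      "ain't aren't can't couldn't daren't didn't doesn't "
--      "dont hadnt hasnt havent isnt mightnt mustnt neither "
--      "don't hadn't hasn't haven't isn't mightn't mustn't "
--      "neednt needn't never none nope nor not nothing nowhere "
--      "oughtnt shant shouldnt uhuh wasnt werent "
--      "oughtn't shan't shouldn't uh-uh wasn't weren't "
--      "without wont wouldnt won't wouldn't rarely seldom despite "
--      "only least").split())
--
-- def negated(input_words, include_nt=True):
--     """Determine if input contains negation words (single pass over the input)."""
--     return any(w in NEGATE_SET or (include_nt and "n't" in w)
--                for w in (str(x).lower() for x in input_words))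
-- ===== Notes on version B (the rewrite author's own statement) =====
-- stated objective: faster
-- what changed: A scans the 62-word NEGATE list doing an O(n) list-membership test per negation word plus a second loop for "n't"; B builds the lexicon once from a split string into a set and makes a single any() pass over the input words with a combined predicate.
import Mathlib
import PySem

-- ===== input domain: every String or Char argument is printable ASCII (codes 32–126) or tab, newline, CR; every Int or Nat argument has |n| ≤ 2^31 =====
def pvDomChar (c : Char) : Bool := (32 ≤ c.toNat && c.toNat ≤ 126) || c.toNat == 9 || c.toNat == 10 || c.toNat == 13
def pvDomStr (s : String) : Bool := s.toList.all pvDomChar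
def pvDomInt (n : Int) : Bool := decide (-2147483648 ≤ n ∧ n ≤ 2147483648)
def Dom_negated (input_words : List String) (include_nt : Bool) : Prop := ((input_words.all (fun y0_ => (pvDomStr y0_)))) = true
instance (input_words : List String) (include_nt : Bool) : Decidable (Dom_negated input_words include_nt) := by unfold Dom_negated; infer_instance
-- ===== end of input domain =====

-- B replaces A's two staged loops (a 62-word list scan with list membership per
-- negation word, then an "n't" loop) by one any() pass over the input words with a
-- combined predicate against a set built once from a split string.

-- ===== PORT A =====
def NEGATE : List String :=
  ["aint", "arent", "cannot", "cant", "couldnt", "darent", "didnt", "doesnt",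
   "ain't", "aren't", "can't", "couldn't", "daren't", "didn't", "doesn't",
   "dont", "hadnt", "hasnt", "havent", "isnt", "mightnt", "mustnt", "neither",
   "don't", "hadn't", "hasn't", "haven't", "isn't", "mightn't", "mustn't",
   "neednt", "needn't", "never", "none", "nope", "nor", "not", "nothing", "nowhere",
   "oughtnt", "shant", "shouldnt", "uhuh", "wasnt", "werent",
   "oughtn't", "shan't", "shouldn't", "uh-uh", "wasn't", "weren't",
   "without", "wont", "wouldnt", "won't", "wouldn't", "rarely", "seldom", "despite",
   "only", "least"]

-- 'for word in neg_words: if word in input_words: return True'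
def negLoopA (neg_words : List String) (input_words : List String) : Bool :=
  match neg_words with
  | [] => false
  | word :: rest => if input_words.contains word then true else negLoopA rest input_words

-- 'for word in input_words: if "n't" in word: return True'
def ntLoopA (input_words : List String) : Bool :=
  match input_words with
  | [] => false
  | word :: rest => if PySem.Str.isIn "n't" word then true else ntLoopA rest

def negated (input_words : List String) (include_nt : Bool) : Bool :=
  let iw := input_words.map PySem.Str.lower
  if negLoopA NEGATE iw then true
  else if include_nt then ntLoopA iw
  else false

-- ===== PORT B =====
-- frozenset(("aint arent ... least").split())
def NEGATE_SET : PySem.Set String := PySem.Set.ofList (PySem.Str.split₀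
  ("aint arent cannot cant couldnt darent didnt doesnt " ++
   "ain't aren't can't couldn't daren't didn't doesn't " ++
   "dont hadnt hasnt havent isnt mightnt mustnt neither " ++
   "don't hadn't hasn't haven't isn't mightn't mustn't " ++
   "neednt needn't never none nope nor not nothing nowhere " ++
   "oughtnt shant shouldnt uhuh wasnt werent " ++
   "oughtn't shan't shouldn't uh-uh wasn't weren't " ++
   "without wont wouldnt won't wouldn't rarely seldom despite " ++
   "only least"))

-- 'any(w in NEGATE_SET or (include_nt and "n't" in w) for w in (str(x).lower() for x in input_words))'
def negated_alt (input_words : List String) (include_nt : Bool) : Bool :=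
  input_words.any (fun x =>
    let w := PySem.Str.lower x
    PySem.Set.contains NEGATE_SET w || (include_nt && PySem.Str.isIn "n't" w))

-- ===== PRECONDITION & SPEC =====
def Spec_negated (input_words : List String) (include_nt : Bool) (out : Bool) : Prop := out = negated_alt input_words include_nt
instance (input_words : List String) (include_nt : Bool) (out : Bool) : Decidable (Spec_negated input_words include_nt out) := by unfold Spec_negated; infer_instance

-- ===== CLAIM (what is proved, stated in full; the proofs are below) =====
def Claim_equal_negated : Prop := ∀ (input_words : List String) (include_nt : Bool), Dom_negated input_words include_nt → Spec_negated input_words include_nt (negated input_words include_nt)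

-- ===== LEMMAS AND PROOFS =====

set_option maxRecDepth 40000 in
theorem negSet_mem (x : String) : PySem.Set.contains NEGATE_SET x = true ↔ x ∈ NEGATE := by
  rw [PySem.Set.contains_iff, show NEGATE_SET = PySem.Set.ofList NEGATE by decide,
    PySem.Set.mem_ofList]

theorem negLoopA_iff (negs iw : List String) :
    negLoopA negs iw = true ↔ ∃ n ∈ negs, n ∈ iw := by
  induction negs with
  | nil => simp [negLoopA]
  | cons w rest ih =>
    by_cases h : iw.contains w
    · rw [negLoopA, if_pos h]
      exact iff_of_true (by trivial) ⟨w, List.mem_cons_self .., by simpa using h⟩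
    · rw [negLoopA, if_neg h, ih]
      constructor
      · rintro ⟨n, hn, hi⟩; exact ⟨n, List.mem_cons_of_mem _ hn, hi⟩
      · rintro ⟨n, hn, hi⟩
        rcases List.mem_cons.mp hn with rfl | hn
        · exact absurd hi (by simpa using h)
        · exact ⟨n, hn, hi⟩

theorem ntLoopA_iff (iw : List String) :
    ntLoopA iw = true ↔ ∃ w ∈ iw, PySem.Str.isIn "n't" w = true := by
  induction iw with
  | nil => simp [ntLoopA]
  | cons w rest ih =>
    by_cases h : PySem.Str.isIn "n't" w
    · rw [ntLoopA, if_pos h]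
      exact iff_of_true (by trivial) ⟨w, List.mem_cons_self .., h⟩
    · rw [ntLoopA, if_neg h, ih]
      constructor
      · rintro ⟨n, hn, hi⟩; exact ⟨n, List.mem_cons_of_mem _ hn, hi⟩
      · rintro ⟨n, hn, hi⟩
        rcases List.mem_cons.mp hn with rfl | hn
        · exact absurd hi h
        · exact ⟨n, hn, hi⟩

theorem alt_iff (iw : List String) (inc : Bool) :
    negated_alt iw inc = true ↔
      ∃ w ∈ iw, PySem.Str.lower w ∈ NEGATE ∨
        (inc = true ∧ PySem.Str.isIn "n't" (PySem.Str.lower w) = true) := by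
  rw [negated_alt, List.any_eq_true]
  refine exists_congr fun w => and_congr_right fun _ => ?_
  simp only [Bool.or_eq_true, Bool.and_eq_true, negSet_mem]

theorem negated_iff (iw : List String) (inc : Bool) :
    negated iw inc = true ↔
      (∃ n ∈ NEGATE, n ∈ iw.map PySem.Str.lower) ∨
        (inc = true ∧ ∃ w ∈ iw.map PySem.Str.lower, PySem.Str.isIn "n't" w = true) := by
  rw [negated]
  by_cases h1 : negLoopA NEGATE (iw.map PySem.Str.lower) = true
  · simp only [h1, if_true]
    exact iff_of_true (by trivial) (Or.inl ((negLoopA_iff _ _).mp h1))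
  · simp only [Bool.not_eq_true] at h1
    simp only [h1, Bool.false_eq_true, if_false]
    cases inc with
    | false =>
      simp only [Bool.false_eq_true, if_false, false_and, or_false]
      exact iff_of_false (by simp) (fun hc => by rw [← negLoopA_iff] at hc; simp [h1] at hc)
    | true =>
      simp only [if_true, true_and]
      rw [ntLoopA_iff]
      constructor
      · exact Or.inr
      · rintro (hc | hc)
        · exact absurd ((negLoopA_iff _ _).mpr hc) (by simp [h1])
        · exact hc

-- ===== VERDICT (by name: the statement is the Claim_ definition above) =====
theorem negated_spec : Claim_equal_negated := by
  intro iw inc _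
  show negated iw inc = negated_alt iw inc
  rw [Bool.eq_iff_iff, negated_iff, alt_iff]
  simp only [List.mem_map]
  constructor
  · rintro (⟨n, hn, x, hx, rfl⟩ | ⟨hinc, w, ⟨x, hx, rfl⟩, hP⟩)
    · exact ⟨x, hx, Or.inl hn⟩
    · exact ⟨x, hx, Or.inr ⟨hinc, hP⟩⟩
  · rintro ⟨x, hx, h | ⟨hinc, hP⟩⟩
    · exact Or.inl ⟨PySem.Str.lower x, h, x, hx, rfl⟩
    · exact Or.inr ⟨hinc, PySem.Str.lower x, ⟨x, hx, rfl⟩, hP⟩
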